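-- pv_equiv track=rewrite | github.com/valestanov/LinguisticToolkit | linguistictoolkit/tools/yubao.py | getsd
-- ===== SOURCE A (Python) =====
-- def getsd(word, sdfh='0123456789'):
--     sdtype = ''
--     for char in word:
--         if char in sdfh:
--             sdtype += char
--         else:
--             sdtype += '-'
--     while '--' in sdtype:
--         sdtype = sdtype.replace('--','-')
--     sdtype = sdtype.strip('-')
--     return sdtype
-- ===== SOURCE B (Python) =====
-- def getsd(word, sdfh='0123456789'):
--     masked = ''.join(c if c in sdfh else '-' for c in word)
--     return '-'.join(p for p in masked.split('-') if p)
-- ===== Notes on version B (the rewrite author's own statement) =====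
-- stated objective: simpler
-- what changed: Replaces A's per-char string appending followed by an iterated double-dash-replace fixpoint loop and a final strip by a single mask-join pass followed by one split on the dash with the empty pieces filtered out and rejoined.
import Mathlib
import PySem

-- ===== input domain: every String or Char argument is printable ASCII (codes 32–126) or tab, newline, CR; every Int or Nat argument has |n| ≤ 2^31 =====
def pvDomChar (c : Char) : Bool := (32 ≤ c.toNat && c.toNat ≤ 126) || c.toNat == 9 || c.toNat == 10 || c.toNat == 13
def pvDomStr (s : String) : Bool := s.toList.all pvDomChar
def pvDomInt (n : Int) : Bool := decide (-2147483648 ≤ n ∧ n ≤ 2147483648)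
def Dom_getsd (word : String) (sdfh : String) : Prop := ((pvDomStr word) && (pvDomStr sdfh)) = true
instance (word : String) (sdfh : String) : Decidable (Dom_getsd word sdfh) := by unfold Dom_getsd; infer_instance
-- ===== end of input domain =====

-- B replaces A's iterated replace('--','-') fixpoint loop and strip('-') by mask + split('-')/filter/join; equivalence of the return values is proved for all inputs.

-- ===== PORT A =====
-- pvRep is replace(s, '--', '-') as a clean recursion; it is needed by getsdCollapse's
-- termination proof (cited in decreasing_by), so it and its length lemmas stay above the port.
def pvRep : List Char → List Char
  | [] => []
  | [c] => [c]
  | a :: b :: t => if a = '-' ∧ b = '-' then '-' :: pvRep t else a :: pvRep (b :: t)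

theorem pvReplaceGo_eq (fuel : Nat) : ∀ (l acc : List Char), l.length ≤ fuel →
    PySem.Chars.replace.go ['-', '-'] ['-'] fuel l acc = acc.reverse ++ pvRep l := by
  induction fuel with
  | zero =>
    intro l acc h
    have : l = [] := List.eq_nil_of_length_eq_zero (Nat.le_zero.mp h)
    subst this
    simp [PySem.Chars.replace.go, pvRep]
  | succ fuel ih =>
    intro l acc h
    match l with
    | [] => simp [PySem.Chars.replace.go, pvRep]
    | [c] =>
      have hpre : (['-', '-'] : List Char).isPrefixOf [c] = false := by
        simp [List.isPrefixOf]
      simp only [PySem.Chars.replace.go, hpre, Bool.false_eq_true, if_false]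
      rw [ih [] (c :: acc) (by simp)]
      simp [pvRep]
    | a :: b :: t =>
      by_cases hab : a = '-' ∧ b = '-'
      · obtain ⟨ha, hb⟩ := hab
        subst ha; subst hb
        have hpre : (['-', '-'] : List Char).isPrefixOf ('-' :: '-' :: t) = true := by
          simp [List.isPrefixOf]
        simp only [PySem.Chars.replace.go, hpre, if_true]
        rw [show List.drop (['-', '-'] : List Char).length ('-' :: '-' :: t) = t from rfl]
        rw [ih t ((['-'] : List Char).reverse ++ acc) (by simp at h ⊢; omega)]
        simp [pvRep]
      · have hpre : (['-', '-'] : List Char).isPrefixOf (a :: b :: t) = false := by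
          simp [List.isPrefixOf]
          intro ha hb
          exact hab ⟨ha.symm, hb.symm⟩
        simp only [PySem.Chars.replace.go, hpre, Bool.false_eq_true, if_false]
        rw [ih (b :: t) (a :: acc) (by simp at h ⊢; omega)]
        simp [pvRep, hab]

theorem pvReplace_eq (m : List Char) :
    PySem.Chars.replace m ['-', '-'] ['-'] = pvRep m := by
  have := pvReplaceGo_eq m.length m [] le_rfl
  simp only [PySem.Chars.replace] at *
  simpa using this

theorem pvRep_length_le (m : List Char) : (pvRep m).length ≤ m.length := by
  induction m using pvRep.induct with
  | case1 => simp [pvRep]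
  | case2 c => simp [pvRep]
  | case3 a b t hab ih => simp [pvRep, hab]; omega
  | case4 a b t hab ih => simp [pvRep, hab] at ih ⊢; omega

theorem pvRep_length_lt (m : List Char) (h : ['-', '-'] <:+: m) :
    (pvRep m).length < m.length := by
  induction m using pvRep.induct with
  | case1 => simp at h
  | case2 c =>
    exfalso
    have := h.length_le
    simp at this
  | case3 a b t hab ih =>
    have := pvRep_length_le t
    simp [pvRep, hab]
    omega
  | case4 a b t hab ih =>
    have hbt : ['-', '-'] <:+: b :: t := by
      rcases List.infix_cons_iff.mp h with hp | hi
      · exfalso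
        obtain ⟨r, hr⟩ := hp
        simp at hr
        exact hab ⟨hr.1.symm, hr.2.1.symm⟩
      · exact hi
    have h2 := ih hbt
    simp only [pvRep, if_neg hab, List.length_cons]
    simp only [List.length_cons] at h2
    omega

def getsdCollapse (s : List Char) : List Char :=
  if h : PySem.Chars.isIn ['-', '-'] s = true then
    getsdCollapse (PySem.Chars.replace s ['-', '-'] ['-'])
  else s
termination_by s.length
decreasing_by
  rw [pvReplace_eq]
  exact pvRep_length_lt s ((PySem.Chars.isIn_iff_infix _ _).mp h)

def getsd (word : String) (sdfh : String) : String :=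
  let sdtype : List Char := word.toList.foldl
    (fun acc c => acc ++ [if PySem.Chars.isIn [c] sdfh.toList then c else '-']) []
  String.ofList (PySem.Chars.stripChars (getsdCollapse sdtype) ['-'])

-- ===== PORT B =====
def getsd_alt (word : String) (sdfh : String) : String :=
  let masked : List Char := word.toList.map
    (fun c => if PySem.Chars.isIn [c] sdfh.toList then c else '-')
  String.ofList (PySem.Chars.join ['-']
    ((PySem.Chars.splitOn masked ['-']).filter (fun p => !p.isEmpty)))

-- ===== PRECONDITION & SPEC =====
def Spec_getsd (word : String) (sdfh : String) (out : String) : Prop := out = getsd_alt word sdfh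
instance (word : String) (sdfh : String) (out : String) : Decidable (Spec_getsd word sdfh out) := by unfold Spec_getsd; infer_instance

-- ===== CLAIM (what is proved, stated in full; the proofs are below) =====
def Claim_equal_getsd : Prop := ∀ (word : String) (sdfh : String), Dom_getsd word sdfh → Spec_getsd word sdfh (getsd word sdfh)

-- ===== LEMMAS AND PROOFS =====

-- one-pass collapse of adjacent dashes: the fixpoint of A's while-replace loop
def pvCAdj : List Char → List Char
  | [] => []
  | [c] => [c]
  | a :: b :: t => if a = '-' ∧ b = '-' then pvCAdj (b :: t) else a :: pvCAdj (b :: t)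

-- Python split('-') as a clean recursion
def pvSplit : List Char → List (List Char)
  | [] => [[]]
  | c :: t =>
    if c = '-' then [] :: pvSplit t
    else
      match pvSplit t with
      | [] => [[c]]
      | g :: gs => (c :: g) :: gs

-- '-'.join as a clean recursion
def pvJoin : List (List Char) → List Char
  | [] => []
  | [g] => g
  | g :: g' :: gs => g ++ '-' :: pvJoin (g' :: gs)

def pvF (m : List Char) : List Char := pvJoin ((pvSplit m).filter (fun p => !p.isEmpty))

def pvTail (t : List Char) : List Char :=
  if pvF t = [] then [] else if t.head? = some '-' then '-' :: pvF t else pvF t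

def pvRstrip (x : List Char) : List Char :=
  (x.reverse.dropWhile (fun c => (['-'] : List Char).contains c)).reverse

theorem pvSplit_ne_nil (t : List Char) : pvSplit t ≠ [] := by
  cases t with
  | nil => simp [pvSplit]
  | cons c u =>
    simp only [pvSplit]
    split
    · simp
    · split <;> simp

theorem pvSplitGo_eq (fuel : Nat) : ∀ (l cur : List Char) (accs : List (List Char))
    (g : List Char) (gs : List (List Char)), pvSplit l = g :: gs → l.length ≤ fuel →
    PySem.Chars.splitOn.go ['-'] fuel l cur accs =
      accs.reverse ++ ((cur.reverse ++ g) :: gs) := by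
  induction fuel with
  | zero =>
    intro l cur accs g gs hsp h
    have : l = [] := List.eq_nil_of_length_eq_zero (Nat.le_zero.mp h)
    subst this
    simp [pvSplit] at hsp
    obtain ⟨hg, hgs⟩ := hsp
    subst hg; subst hgs
    simp [PySem.Chars.splitOn.go]
  | succ fuel ih =>
    intro l cur accs g gs hsp h
    match l with
    | [] =>
      simp [pvSplit] at hsp
      obtain ⟨hg, hgs⟩ := hsp
      subst hg; subst hgs
      simp [PySem.Chars.splitOn.go]
    | c :: rest =>
      by_cases hc : c = '-'
      · subst hc
        have hpre : (['-'] : List Char).isPrefixOf ('-' :: rest) = true := by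
          simp [List.isPrefixOf]
        simp only [pvSplit, if_pos] at hsp
        obtain ⟨hg, hgs⟩ := List.cons.inj hsp
        obtain ⟨g', gs', hrest⟩ := List.exists_cons_of_ne_nil (pvSplit_ne_nil rest)
        simp only [PySem.Chars.splitOn.go, hpre, if_true]
        rw [show List.drop (['-'] : List Char).length ('-' :: rest) = rest from rfl]
        rw [ih rest [] (cur.reverse :: accs) g' gs' hrest (by simp at h ⊢; omega)]
        simp [← hg, ← hgs, hrest]
      · have hpre : (['-'] : List Char).isPrefixOf (c :: rest) = false := by
          simp [List.isPrefixOf]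
          intro hc'
          exact hc hc'.symm
        obtain ⟨g', gs', hrest⟩ := List.exists_cons_of_ne_nil (pvSplit_ne_nil rest)
        simp only [pvSplit, if_neg hc, hrest] at hsp
        obtain ⟨hg, hgs⟩ := List.cons.inj hsp
        simp only [PySem.Chars.splitOn.go, hpre, Bool.false_eq_true, if_false]
        rw [ih rest (c :: cur) accs g' gs' hrest (by simp at h ⊢; omega)]
        simp [← hg, ← hgs]

theorem pvSplitOn_eq (m : List Char) : PySem.Chars.splitOn m ['-'] = pvSplit m := by
  obtain ⟨g, gs, hm⟩ := List.exists_cons_of_ne_nil (pvSplit_ne_nil m)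
  unfold PySem.Chars.splitOn
  rw [pvSplitGo_eq (m.length + 1) m [] [] g gs hm (by omega)]
  simp [hm]

theorem pvJoin_eq (L : List (List Char)) : PySem.Chars.join ['-'] L = pvJoin L := by
  induction L using pvJoin.induct with
  | case1 => rfl
  | case2 g => simp [PySem.Chars.join, pvJoin, List.intercalate]
  | case3 g g' gs ih =>
    simp only [PySem.Chars.join, List.intercalate] at ih ⊢
    rw [List.intersperse_cons₂]
    simp only [List.flatten_cons]
    rw [ih]
    simp [pvJoin]

theorem pvJoin_ne_nil (L : List (List Char)) (hL : L ≠ []) (h : ∀ g ∈ L, g ≠ []) :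
    pvJoin L ≠ [] := by
  match L with
  | [] => exact absurd rfl hL
  | [g] => simpa [pvJoin] using h g (by simp)
  | g :: g' :: gs => simp [pvJoin]

theorem pvF_dash (t : List Char) : pvF ('-' :: t) = pvF t := by
  simp [pvF, pvSplit]

theorem pvJoin_cons_head (x : Char) (g : List Char) (L : List (List Char)) :
    pvJoin ((x :: g) :: L) = x :: pvJoin (g :: L) := by
  match L with
  | [] => rfl
  | h :: r => simp [pvJoin]

theorem pvF_cons (c : Char) (t : List Char) (hc : c ≠ '-') :
    pvF (c :: t) = c :: pvTail t := by
  cases t with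
  | nil => simp [pvF, pvSplit, pvJoin, pvTail, hc]
  | cons c' u =>
    by_cases hc' : c' = '-'
    · subst hc'
      have h1 : pvSplit (c :: '-' :: u) = [c] :: pvSplit u := by
        simp [pvSplit, hc]
      have h2 : pvF ('-' :: u) = pvF u := pvF_dash u
      rw [pvF, h1, List.filter_cons_of_pos (by simp)]
      rw [pvTail, List.head?_cons, h2]
      rcases hfu : (pvSplit u).filter (fun p => !p.isEmpty) with _ | ⟨h0, r0⟩
      · have h3 : pvF u = [] := by rw [pvF, hfu]; rfl
        rw [hfu, if_pos h3]
        simp [pvJoin]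
      · have hne : pvF u ≠ [] := by
          rw [pvF, hfu]
          exact pvJoin_ne_nil _ (by simp) (fun g hg => by
            have := (List.mem_filter.mp (hfu ▸ hg)).2
            simpa using this)
        rw [hfu, if_neg hne, if_pos rfl]
        rw [show pvF u = pvJoin (h0 :: r0) by rw [pvF, hfu]]
        simp [pvJoin]
    · obtain ⟨g, gs, hu⟩ := List.exists_cons_of_ne_nil (pvSplit_ne_nil u)
      have h1 : pvSplit (c' :: u) = (c' :: g) :: gs := by simp [pvSplit, hc', hu]
      have h2 : pvSplit (c :: c' :: u) = (c :: c' :: g) :: gs := by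
        simp only [pvSplit, if_neg hc, if_neg hc', hu]
      have hFc' : pvF (c' :: u) = c' :: pvJoin (g :: (gs.filter (fun p => !p.isEmpty))) := by
        rw [pvF, h1, List.filter_cons_of_pos (by simp), pvJoin_cons_head]
      have hne : pvF (c' :: u) ≠ [] := by rw [hFc']; simp
      rw [pvF, h2, List.filter_cons_of_pos (by simp), pvJoin_cons_head, pvJoin_cons_head]
      rw [pvTail, if_neg hne, List.head?_cons, if_neg (by simp [hc']), hFc']

theorem pvRep_cons (c : Char) (u : List Char) : ∃ r, pvRep (c :: u) = c :: r := by
  cases u with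
  | nil => exact ⟨[], rfl⟩
  | cons b t =>
    by_cases h : c = '-' ∧ b = '-'
    · obtain ⟨hc0, hb0⟩ := h
      subst hc0; subst hb0
      exact ⟨pvRep t, rfl⟩
    · exact ⟨pvRep (b :: t), by simp [pvRep, h]⟩

-- pvRep preserves the collapsed form (joint statement for the strong induction)
theorem pvCAdj_pvRep (n : Nat) : ∀ (m : List Char), m.length ≤ n →
    pvCAdj (pvRep m) = pvCAdj m ∧ pvCAdj ('-' :: pvRep m) = pvCAdj ('-' :: m) := by
  induction n with
  | zero =>
    intro m h
    have : m = [] := List.eq_nil_of_length_eq_zero (Nat.le_zero.mp h)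
    subst this
    exact ⟨rfl, rfl⟩
  | succ n ih =>
    intro m h
    match m with
    | [] => exact ⟨rfl, rfl⟩
    | [c] => exact ⟨rfl, rfl⟩
    | a :: b :: t =>
      simp only [List.length_cons] at h
      by_cases hab : a = '-' ∧ b = '-'
      · obtain ⟨ha, hb⟩ := hab
        subst ha; subst hb
        have ht := ih t (by omega)
        constructor
        · rw [show pvRep ('-' :: '-' :: t) = '-' :: pvRep t by simp [pvRep]]
          rw [show pvCAdj ('-' :: '-' :: t) = pvCAdj ('-' :: t) by simp [pvCAdj]]
          exact ht.2
        · rw [show pvRep ('-' :: '-' :: t) = '-' :: pvRep t by simp [pvRep]]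
          rw [show pvCAdj ('-' :: '-' :: pvRep t) = pvCAdj ('-' :: pvRep t) by simp [pvCAdj]]
          rw [show pvCAdj ('-' :: '-' :: '-' :: t) = pvCAdj ('-' :: '-' :: t) by simp [pvCAdj]]
          rw [show pvCAdj ('-' :: '-' :: t) = pvCAdj ('-' :: t) by simp [pvCAdj]]
          exact ht.2
      · have hbt := ih (b :: t) (by simp; omega)
        obtain ⟨r, hr⟩ := pvRep_cons b t
        have hrep : pvRep (a :: b :: t) = a :: b :: r := by
          simp [pvRep, hab, hr]
        have g1 : pvCAdj (pvRep (a :: b :: t)) = pvCAdj (a :: b :: t) := by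
          rw [hrep]
          rw [show pvCAdj (a :: b :: r) = a :: pvCAdj (b :: r) by simp [pvCAdj, hab]]
          rw [show pvCAdj (a :: b :: t) = a :: pvCAdj (b :: t) by simp [pvCAdj, hab]]
          rw [← hr]
          exact congrArg (a :: ·) hbt.1
        refine ⟨g1, ?_⟩
        by_cases ha : a = '-'
        · subst ha
          have hb : ¬ (b = '-') := fun hb => hab ⟨rfl, hb⟩
          rw [hrep]
          rw [show pvCAdj ('-' :: '-' :: b :: r) = pvCAdj ('-' :: b :: r) by simp [pvCAdj]]
          rw [show pvCAdj ('-' :: '-' :: b :: t) = pvCAdj ('-' :: b :: t) by simp [pvCAdj]]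
          rw [← hr]
          exact hbt.2
        · rw [hrep]
          rw [show pvCAdj ('-' :: a :: b :: r) = '-' :: pvCAdj (a :: b :: r)
                by simp [pvCAdj, ha]]
          rw [show pvCAdj ('-' :: a :: b :: t) = '-' :: pvCAdj (a :: b :: t)
                by simp [pvCAdj, ha]]
          rw [← hrep]
          exact congrArg ('-' :: ·) g1

theorem pvCAdj_of_no_dd (m : List Char) (h : ¬ (['-', '-'] <:+: m)) : pvCAdj m = m := by
  induction m using pvCAdj.induct with
  | case1 => rfl
  | case2 c => rfl
  | case3 a b t hab ih =>
    exfalso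
    apply h
    obtain ⟨ha, hb⟩ := hab
    subst ha; subst hb
    exact ⟨[], t, rfl⟩
  | case4 a b t hab ih =>
    have hbt : ¬ (['-', '-'] <:+: b :: t) := fun hi =>
      h (List.infix_cons_iff.mpr (Or.inr hi))
    rw [show pvCAdj (a :: b :: t) = a :: pvCAdj (b :: t) by simp [pvCAdj, hab]]
    rw [ih hbt]

theorem pvCollapse_eq (m : List Char) : getsdCollapse m = pvCAdj m := by
  induction m using getsdCollapse.induct with
  | case1 s h ih =>
    rw [getsdCollapse, dif_pos h, ih, pvReplace_eq]
    exact (pvCAdj_pvRep s.length s le_rfl).1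
  | case2 s h =>
    rw [getsdCollapse, dif_neg h]
    exact (pvCAdj_of_no_dd s (by
      rw [← PySem.Chars.isIn_iff_infix]
      simpa using h)).symm

theorem pvRstrip_cons (c : Char) (x : List Char) :
    pvRstrip (c :: x) =
      if pvRstrip x = [] then (if c = '-' then [] else [c]) else c :: pvRstrip x := by
  have hstep : pvRstrip (c :: x) =
      (List.dropWhile (fun c => (['-'] : List Char).contains c)
        (x.reverse ++ [c])).reverse := by
    unfold pvRstrip
    rw [List.reverse_cons]
  by_cases he : List.dropWhile (fun c => (['-'] : List Char).contains c) x.reverse = []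
  · have hx : pvRstrip x = [] := by unfold pvRstrip; rw [he]; rfl
    rw [if_pos hx, hstep, List.dropWhile_append, if_pos (by rw [he]; rfl)]
    by_cases hc : c = '-'
    · subst hc
      simp [List.dropWhile]
    · simp [List.dropWhile, hc]
  · have hx : pvRstrip x ≠ [] := by
      unfold pvRstrip
      simpa [List.reverse_eq_nil_iff] using he
    rw [if_neg hx, hstep, List.dropWhile_append,
        if_neg (by simp only [List.isEmpty_iff]; exact he)]
    rw [List.reverse_append]
    unfold pvRstrip
    simp

theorem pvF_cons_ne_nil (c : Char) (t : List Char) (hc : c ≠ '-') : pvF (c :: t) ≠ [] := by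
  rw [pvF_cons c t hc]
  simp

theorem pvRstrip_pvCAdj (n : Nat) : ∀ (t : List Char), t.length ≤ n →
    pvRstrip (pvCAdj t) = pvTail t := by
  induction n with
  | zero =>
    intro t h
    have : t = [] := List.eq_nil_of_length_eq_zero (Nat.le_zero.mp h)
    subst this
    simp [pvCAdj, pvRstrip, pvTail, pvF, pvSplit, pvJoin]
  | succ n ih =>
    intro t h
    match t with
    | [] => simp [pvCAdj, pvRstrip, pvTail, pvF, pvSplit, pvJoin]
    | c :: u =>
      simp only [List.length_cons] at h
      by_cases hc : c = '-'
      · subst hc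
        match u with
        | [] =>
          rw [show pvCAdj ['-'] = ['-'] from rfl]
          rw [show pvRstrip ['-'] = [] by simp [pvRstrip, List.dropWhile]]
          rw [pvTail, if_pos (by simp [pvF, pvSplit, pvJoin])]
        | '-' :: v =>
          rw [show pvCAdj ('-' :: '-' :: v) = pvCAdj ('-' :: v) by simp [pvCAdj]]
          rw [ih ('-' :: v) (by simp at h ⊢; omega)]
          rw [pvTail, pvTail, pvF_dash, pvF_dash, pvF_dash]
          simp
        | c' :: v =>
          by_cases hc' : c' = '-'
          · subst hc'
            rw [show pvCAdj ('-' :: '-' :: v) = pvCAdj ('-' :: v) by simp [pvCAdj]]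
            rw [ih ('-' :: v) (by simp at h ⊢; omega)]
            rw [pvTail, pvTail, pvF_dash, pvF_dash, pvF_dash]
            simp
          · rw [show pvCAdj ('-' :: c' :: v) = '-' :: pvCAdj (c' :: v)
                  by simp [pvCAdj, hc']]
            rw [pvRstrip_cons, if_pos rfl]
            rw [ih (c' :: v) (by simp at h ⊢; omega)]
            have hne : pvF (c' :: v) ≠ [] := pvF_cons_ne_nil c' v hc'
            rw [show pvTail (c' :: v) = pvF (c' :: v) by
                  rw [pvTail, if_neg hne, List.head?_cons, if_neg (by simp [hc'])]]
            rw [if_neg hne]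
            rw [pvTail, if_neg (by rw [pvF_dash]; exact hne), List.head?_cons,
                if_pos rfl, pvF_dash]
      · have hca : pvCAdj (c :: u) = c :: pvCAdj u := by
          cases u with
          | nil => rfl
          | cons b v => simp [pvCAdj, hc]
        rw [hca, pvRstrip_cons, if_neg hc, ih u (by omega)]
        have hft : pvF (c :: u) = c :: pvTail u := pvF_cons c u hc
        have hTne : pvF (c :: u) ≠ [] := pvF_cons_ne_nil c u hc
        have h5 : pvTail (c :: u) = c :: pvTail u := by
          have hdef : pvTail (c :: u) =
              if pvF (c :: u) = [] then []
              else if (c :: u).head? = some '-' then '-' :: pvF (c :: u)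
              else pvF (c :: u) := rfl
          rw [hdef, if_neg hTne, List.head?_cons, if_neg (by simp [hc]), hft]
        rw [h5]
        by_cases hu : pvTail u = []
        · rw [if_pos hu, hu]
        · rw [if_neg hu]

theorem pvStripChars_eq (s : List Char) :
    PySem.Chars.stripChars s ['-'] =
      pvRstrip (s.dropWhile (fun c => (['-'] : List Char).contains c)) := rfl

theorem pvStrip_pvCAdj (n : Nat) : ∀ (m : List Char), m.length ≤ n →
    PySem.Chars.stripChars (pvCAdj m) ['-'] = pvF m := by
  induction n with
  | zero =>
    intro m h
    have : m = [] := List.eq_nil_of_length_eq_zero (Nat.le_zero.mp h)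
    subst this
    rfl
  | succ n ih =>
    intro m h
    match m with
    | [] => rfl
    | c :: u =>
      simp only [List.length_cons] at h
      by_cases hc : c = '-'
      · subst hc
        match u with
        | [] => rfl
        | '-' :: v =>
          rw [show pvCAdj ('-' :: '-' :: v) = pvCAdj ('-' :: v) by simp [pvCAdj]]
          rw [ih ('-' :: v) (by simp at h ⊢; omega), pvF_dash, pvF_dash, pvF_dash]
        | c' :: v =>
          by_cases hc' : c' = '-'
          · subst hc'
            rw [show pvCAdj ('-' :: '-' :: v) = pvCAdj ('-' :: v) by simp [pvCAdj]]
            rw [ih ('-' :: v) (by simp at h ⊢; omega), pvF_dash, pvF_dash, pvF_dash]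
          · rw [show pvCAdj ('-' :: c' :: v) = '-' :: pvCAdj (c' :: v)
                  by simp [pvCAdj, hc']]
            rw [pvStripChars_eq]
            rw [show List.dropWhile (fun c => (['-'] : List Char).contains c)
                  ('-' :: pvCAdj (c' :: v)) =
                List.dropWhile (fun c => (['-'] : List Char).contains c)
                  (pvCAdj (c' :: v)) by simp [List.dropWhile]]
            rw [← pvStripChars_eq, ih (c' :: v) (by simp at h ⊢; omega), pvF_dash]
      · have hca : pvCAdj (c :: u) = c :: pvCAdj u := by
          cases u with
          | nil => rfl
          | cons b v => simp [pvCAdj, hc]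
        rw [hca, pvStripChars_eq]
        rw [show List.dropWhile (fun x => (['-'] : List Char).contains x) (c :: pvCAdj u) =
              c :: pvCAdj u by simp [List.dropWhile, hc]]
        rw [pvRstrip_cons, if_neg hc]
        rw [show pvRstrip (pvCAdj u) = pvTail u from pvRstrip_pvCAdj u.length u le_rfl]
        rw [pvF_cons c u hc]
        by_cases hu : pvTail u = []
        · rw [if_pos hu, hu]
        · rw [if_neg hu]

-- ===== VERDICT (by name: the statement is the Claim_ definition above) =====
theorem pvMain (m : List Char) :
    String.ofList (PySem.Chars.stripChars (getsdCollapse m) ['-']) =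
      String.ofList (PySem.Chars.join ['-']
        ((PySem.Chars.splitOn m ['-']).filter (fun p => !p.isEmpty))) := by
  rw [pvCollapse_eq, pvStrip_pvCAdj _ _ le_rfl, pvSplitOn_eq, pvJoin_eq]
  rfl

theorem getsd_spec : Claim_equal_getsd := by
  intro word sdfh _
  show getsd word sdfh = getsd_alt word sdfh
  unfold getsd getsd_alt
  rw [PySem.List.foldl_append_singleton_eq_map]
  exact pvMain _
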